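-- pv_equiv track=rewrite | github.com/rafaelfbastos/correcao_provas_somatorias | metodos.py | validar_entrada
-- ===== SOURCE A (Python) =====
-- def validar_entrada(n_alternativas, valor):
--     x = 0
--     for i in range(n_alternativas):
--         x = x + 2 ** i
--     if valor>x:
--         return False
--     else:
--         return True
-- ===== SOURCE B (Python) =====
-- def validar_entrada(n_alternativas, valor):
--     return valor <= 2 ** max(n_alternativas, 0) - 1
-- ===== Notes on version B (the rewrite author's own statement) =====
-- stated objective: simpler
-- what changed: Replaced the loop accumulating 2**i over range(n_alternativas) by the closed form threshold 2**max(n,0)-1 compared directly against valor.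
import Mathlib
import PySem

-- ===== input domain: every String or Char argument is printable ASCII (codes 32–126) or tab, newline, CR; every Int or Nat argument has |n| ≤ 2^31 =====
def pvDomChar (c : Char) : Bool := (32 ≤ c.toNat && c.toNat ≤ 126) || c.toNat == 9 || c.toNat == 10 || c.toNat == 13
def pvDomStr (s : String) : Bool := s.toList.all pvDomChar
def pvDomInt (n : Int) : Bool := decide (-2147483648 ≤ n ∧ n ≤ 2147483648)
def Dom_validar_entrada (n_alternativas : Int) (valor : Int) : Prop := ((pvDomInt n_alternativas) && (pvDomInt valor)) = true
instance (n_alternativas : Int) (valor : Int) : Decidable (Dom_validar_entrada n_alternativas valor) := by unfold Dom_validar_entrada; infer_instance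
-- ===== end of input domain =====

-- B replaces A's accumulation loop by the closed-form threshold 2^max(n,0) - 1 (simpler; loop removed).

-- ===== PORT A =====
-- 2 ** i with i drawn from range(n_alternativas), so 0 ≤ i and i.toNat is exact
def validar_entrada (n_alternativas : Int) (valor : Int) : Bool :=
  let x := (PySem.List.pyRange 0 n_alternativas 1).foldl (fun x i => x + 2 ^ i.toNat) 0
  if valor > x then false else true

-- ===== PORT B =====
def validar_entrada_alt (n_alternativas : Int) (valor : Int) : Bool :=
  valor ≤ 2 ^ (max n_alternativas 0).toNat - 1

-- ===== PRECONDITION & SPEC =====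
def Spec_validar_entrada (n_alternativas : Int) (valor : Int) (out : Bool) : Prop := out = validar_entrada_alt n_alternativas valor
instance (n_alternativas : Int) (valor : Int) (out : Bool) : Decidable (Spec_validar_entrada n_alternativas valor out) := by unfold Spec_validar_entrada; infer_instance

-- ===== CLAIM (what is proved, stated in full; the proofs are below) =====
def Claim_equal_validar_entrada : Prop := ∀ (n_alternativas : Int) (valor : Int), Dom_validar_entrada n_alternativas valor → Spec_validar_entrada n_alternativas valor (validar_entrada n_alternativas valor)

-- ===== LEMMAS AND PROOFS =====
theorem pv_loop_closed (m : Nat) :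
    (PySem.List.pyRange 0 (m : Int) 1).foldl (fun x i => x + 2 ^ i.toNat) 0 = (2 : Int) ^ m - 1 := by
  induction m with
  | zero => simp [PySem.List.pyRange_one_eq_nil]
  | succ k ih =>
    have h : ((k : Int) + 1) = ((k + 1 : Nat) : Int) := by push_cast; ring
    rw [show ((k + 1 : Nat) : Int) = (k : Int) + 1 by push_cast; ring,
        PySem.List.pyRange_one_succ_right (by positivity), List.foldl_append, ih]
    simp [pow_succ]
    ring

-- ===== VERDICT (by name: the statement is the Claim_ definition above) =====
theorem validar_entrada_spec : Claim_equal_validar_entrada := by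
  intro n v _
  unfold Spec_validar_entrada validar_entrada validar_entrada_alt
  by_cases hn : n ≤ 0
  · rw [PySem.List.pyRange_one_eq_nil hn]
    have : max n 0 = 0 := by omega
    simp only [this, List.foldl_nil]
    by_cases hv : v > (0:Int) <;> simp [hv] <;> omega
  · have h0 : 0 ≤ n := by omega
    have hrepr : n = (n.toNat : Int) := by omega
    rw [hrepr, pv_loop_closed]
    have : max ((n.toNat : Int)) 0 = (n.toNat : Int) := by omega
    simp only [this, Int.toNat_natCast]
    by_cases hv : v > (2 : Int) ^ n.toNat - 1 <;> simp [hv] <;> omega
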